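-- pv_equiv track=rewrite | github.com/SqYang-git/MyNotes | Exercises/1224_oj27141.py | max_total_value
-- ===== SOURCE A (Python) =====
-- def max_total_value(n, values):
--     prefix_sum = 0
--     max_k = 0
--     hashmap = {}
--     hashmap[0] = 0
--     for j in range(1, n+1):
--         prefix_sum += values[j-1]
--         key = prefix_sum - 520 * j
--         if key in hashmap:
--             i = hashmap[key]
--             k = j - i
--             if k > max_k:
--                 max_k = k
--         else:
--             hashmap[key] = j
--     return 520 * max_k
-- ===== SOURCE B (Python) =====
-- def max_total_value(n, values):
--     P = [0]
--     for j in range(1, n + 1):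
--         P.append(P[-1] + values[j - 1])
--     best = 0
--     for j in range(1, n + 1):
--         for i in range(j):
--             if P[j] - P[i] == 520 * (j - i):
--                 if j - i > best:
--                     best = j - i
--                 break
--     return 520 * best
-- ===== Notes on version B (the rewrite author's own statement) =====
-- stated objective: alternative
-- what changed: Replaces A's single-pass prefix-sum hashmap with a precomputed prefix-sum list and an O(n^2) nested scan that, for each end index j, searches start indices left-to-right and breaks at the first one whose window sums to 520*(j-i).
import Mathlib
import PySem

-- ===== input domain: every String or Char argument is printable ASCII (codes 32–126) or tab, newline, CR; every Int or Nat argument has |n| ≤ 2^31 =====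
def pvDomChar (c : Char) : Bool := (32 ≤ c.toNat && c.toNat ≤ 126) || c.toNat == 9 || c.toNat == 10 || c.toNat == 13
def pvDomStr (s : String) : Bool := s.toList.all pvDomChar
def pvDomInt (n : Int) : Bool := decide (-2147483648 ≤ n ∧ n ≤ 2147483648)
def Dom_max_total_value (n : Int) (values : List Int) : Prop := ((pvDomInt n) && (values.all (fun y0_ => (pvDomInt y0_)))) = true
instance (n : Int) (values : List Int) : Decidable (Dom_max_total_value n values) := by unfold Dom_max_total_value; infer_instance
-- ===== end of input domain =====

-- B drops A's prefix-sum hashmap for a plain O(n^2) nested scan over a precomputed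
-- prefix-sum list (break at the first matching start index); alternative, not faster.

-- ===== PORT A =====
-- loop body of A's single pass over j; state = (prefix_sum, max_k, hashmap)
def stepA (values : List Int) (st : Int × Int × PySem.Dict Int Int) (j : Int) :
    Int × Int × PySem.Dict Int Int :=
  -- values[j-1]: IndexError (out-of-range pyGetD) excluded by Pre_
  let prefix_sum := st.1 + PySem.List.pyGetD values (j - 1) 0
  let key := prefix_sum - 520 * j
  match st.2.2.get? key with
  | some i => (prefix_sum, (if j - i > st.2.1 then j - i else st.2.1), st.2.2)
  | none => (prefix_sum, st.2.1, st.2.2.insert key j)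

def max_total_value (n : Int) (values : List Int) : Int :=
  520 * ((PySem.List.pyRange 1 (n + 1) 1).foldl (stepA values)
      (0, 0, PySem.Dict.empty.insert 0 0)).2.1

-- ===== PORT B =====
-- B's first loop: P.append(P[-1] + values[j-1])
def buildP (values : List Int) (P : List Int) (j : Int) : List Int :=
  P ++ [PySem.List.pyGetD P (-1) 0 + PySem.List.pyGetD values (j - 1) 0]

-- B's inner loop over i in range(j), with break at the first match
def altInner (P : List Int) (j best : Int) : List Int → Int
  | [] => best
  | i :: rest =>
    if PySem.List.pyGetD P j 0 - PySem.List.pyGetD P i 0 = 520 * (j - i) then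
      (if j - i > best then j - i else best)
    else altInner P j best rest

-- B's outer loop over j in range(1, n+1), accumulating best
def altOuter (P : List Int) (r : List Int) : Int :=
  r.foldl (fun best j => altInner P j best (PySem.List.pyRange 0 j 1)) 0

def max_total_value_alt (n : Int) (values : List Int) : Int :=
  520 * altOuter ((PySem.List.pyRange 1 (n + 1) 1).foldl (buildP values) [0])
      (PySem.List.pyRange 1 (n + 1) 1)

-- ===== PRECONDITION & SPEC =====
-- A raises IndexError iff n > len(values) (it reads values[0..n-1]); nothing else is excluded.
def Pre_max_total_value (n : Int) (values : List Int) : Prop := n ≤ (values.length : Int)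
instance (n : Int) (values : List Int) : Decidable (Pre_max_total_value n values) := by
  unfold Pre_max_total_value; infer_instance

def pvWitness_max_total_value : Int × List Int := (3, [520, 519, 521])

def Spec_max_total_value (n : Int) (values : List Int) (out : Int) : Prop := out = max_total_value_alt n values
instance (n : Int) (values : List Int) (out : Int) : Decidable (Spec_max_total_value n values out) := by unfold Spec_max_total_value; infer_instance

-- ===== CLAIM (what is proved, stated in full; the proofs are below) =====
def Claim_equal_max_total_value : Prop := ∀ (n : Int) (values : List Int), Dom_max_total_value n values → Pre_max_total_value n values → Spec_max_total_value n values (max_total_value n values)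

-- ===== LEMMAS AND PROOFS =====

-- prefix sum of the first j values, and A's hashmap key at index j
def prefS (v : List Int) (j : Int) : Int := (v.take j.toNat).sum
def prefN (v : List Int) (m : Nat) : Int := prefS v (m : Int)
def keyS (v : List Int) (j : Int) : Int := prefS v j - 520 * j

-- first index in l whose key equals k (left-to-right scan)
def scanFirst (v : List Int) (k : Int) : List Int → Option Int
  | [] => none
  | i :: rest => if keyS v i = k then some i else scanFirst v k rest

-- the common mathematical value of both loops' "best length so far"
def bestS (v : List Int) : Nat → Int
  | 0 => 0
  | t + 1 =>
    match scanFirst v (keyS v ((t : Int) + 1)) (PySem.List.pyRange 0 ((t : Int) + 1) 1) with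
    | some i => if ((t : Int) + 1) - i > bestS v t then ((t : Int) + 1) - i else bestS v t
    | none => bestS v t

theorem scanFirst_append (v : List Int) (k : Int) (l : List Int) (x : Int) :
    scanFirst v k (l ++ [x]) =
      match scanFirst v k l with
      | some i => some i
      | none => if keyS v x = k then some x else none := by
  induction l with
  | nil => rfl
  | cons a l ih => by_cases h : keyS v a = k <;> simp [scanFirst, h, ih]

theorem prefS_succ (v : List Int) (t : Nat) (ht : t < v.length) :
    prefS v ((t : Int) + 1) = prefS v (t : Int) + v.getD t 0 := by
  have h1 : ((t : Int) + 1).toNat = t + 1 := by omega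
  have h2 : ((t : Int)).toNat = t := by omega
  unfold prefS
  rw [h1, h2, List.take_add_one, List.sum_append, List.getElem?_eq_getElem ht,
    List.getD_eq_getElem?_getD, List.getElem?_eq_getElem ht]
  simp

theorem range_succ_split (t : Nat) :
    PySem.List.pyRange 1 ((((t : Nat) + 1 : Nat) : Int) + 1) 1 =
      PySem.List.pyRange 1 ((t : Int) + 1) 1 ++ [(t : Int) + 1] := by
  push_cast
  rw [show ((t : Int) + 1 + 1) = ((t : Int) + 1) + 1 by ring]
  exact PySem.List.pyRange_one_succ_right (by omega)

theorem foldA_spec (v : List Int) (t : Nat) (ht : (t : Int) ≤ v.length) :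
    ((PySem.List.pyRange 1 ((t : Int) + 1) 1).foldl (stepA v)
        (0, 0, PySem.Dict.empty.insert 0 0)).1 = prefS v (t : Int) ∧
    ((PySem.List.pyRange 1 ((t : Int) + 1) 1).foldl (stepA v)
        (0, 0, PySem.Dict.empty.insert 0 0)).2.1 = bestS v t ∧
    ∀ k, ((PySem.List.pyRange 1 ((t : Int) + 1) 1).foldl (stepA v)
        (0, 0, PySem.Dict.empty.insert 0 0)).2.2.get? k =
        scanFirst v k (PySem.List.pyRange 0 ((t : Int) + 1) 1) := by
  induction t with
  | zero =>
    rw [PySem.List.pyRange_one_eq_nil (by omega)]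
    refine ⟨rfl, rfl, fun k => ?_⟩
    rw [PySem.List.pyRange_one_cons (by omega), PySem.List.pyRange_one_eq_nil (by omega)]
    have hk0 : keyS v 0 = 0 := by simp [keyS, prefS]
    simp [scanFirst, hk0, PySem.Dict.get?_insert, eq_comm]
  | succ t ih =>
    obtain ⟨h1, h2, h3⟩ := ih (by push_cast at ht ⊢; omega)
    have hlt : t < v.length := by push_cast at ht; omega
    have hrange := range_succ_split t
    push_cast
    push_cast at hrange
    rw [hrange, List.foldl_append]
    set st := (PySem.List.pyRange 1 ((t : Int) + 1) 1).foldl (stepA v)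
      (0, 0, PySem.Dict.empty.insert 0 0) with hst
    have hps : st.1 + PySem.List.pyGetD v ((t : Int) + 1 - 1) 0 = prefS v ((t : Int) + 1) := by
      rw [h1, show (t : Int) + 1 - 1 = (t : Int) by ring, PySem.List.pyGetD_natCast,
        prefS_succ v t hlt]
    have hkey : st.1 + PySem.List.pyGetD v ((t : Int) + 1 - 1) 0 - 520 * ((t : Int) + 1)
        = keyS v ((t : Int) + 1) := by rw [hps]; rfl
    have hrange0 : PySem.List.pyRange 0 ((t : Int) + 1 + 1) 1 =
        PySem.List.pyRange 0 ((t : Int) + 1) 1 ++ [(t : Int) + 1] :=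
      PySem.List.pyRange_one_succ_right (by omega)
    unfold stepA
    simp only [List.foldl_cons, List.foldl_nil]
    simp only [hkey]
    simp only [hps, h3]
    cases hfind : scanFirst v (keyS v ((t : Int) + 1)) (PySem.List.pyRange 0 ((t : Int) + 1) 1) with
    | some i =>
      refine ⟨rfl, ?_, fun k => ?_⟩
      · simp [bestS, hfind, h2]
      · show st.2.2.get? k = _
        rw [h3 k, hrange0, scanFirst_append]
        cases hk : scanFirst v k (PySem.List.pyRange 0 ((t : Int) + 1) 1) with
        | some j => rfl
        | none =>
          simp only []
          split_ifs with he
          · subst he; rw [hfind] at hk; cases hk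
          · rfl
    | none =>
      refine ⟨rfl, ?_, fun k => ?_⟩
      · simp [bestS, hfind, h2]
      · show (st.2.2.insert (keyS v ((t : Int) + 1)) ((t : Int) + 1)).get? k = _
        rw [PySem.Dict.get?_insert, h3 k, hrange0, scanFirst_append]
        by_cases hke : k = keyS v ((t : Int) + 1)
        · subst hke; simp [hfind]
        · rw [if_neg hke]
          cases hk : scanFirst v k (PySem.List.pyRange 0 ((t : Int) + 1) 1) with
          | some j => rfl
          | none =>
            simp only []
            rw [if_neg (fun he => hke he.symm)]

theorem foldP_spec (v : List Int) (t : Nat) (ht : (t : Int) ≤ v.length) :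
    (PySem.List.pyRange 1 ((t : Int) + 1) 1).foldl (buildP v) [0] =
      (List.range (t + 1)).map (prefN v) := by
  induction t with
  | zero =>
    rw [PySem.List.pyRange_one_eq_nil (by omega)]
    simp [prefN, prefS]
  | succ t ih =>
    have hlt : t < v.length := by push_cast at ht; omega
    have hrange := range_succ_split t
    push_cast
    push_cast at hrange
    rw [hrange, List.foldl_append, ih (by push_cast at ht ⊢; omega)]
    unfold buildP
    have hsplit : (List.range (t + 1)).map (prefN v) =
        (List.range t).map (prefN v) ++ [prefN v t] := by
      rw [List.range_succ, List.map_append]; rfl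
    rw [List.foldl_cons, List.foldl_nil, hsplit,
      PySem.List.pyGetD_neg_one_append_singleton,
      show (t : Int) + 1 - 1 = (t : Int) by ring, PySem.List.pyGetD_natCast]
    have hlast : prefN v t + v.getD t 0 = prefN v (t + 1) := by
      unfold prefN; push_cast; rw [prefS_succ v t hlt]
    rw [hlast, List.range_succ, List.range_succ, List.map_append, List.map_append]
    simp

theorem getP (v : List Int) (N : Nat) (j : Int) (h0 : 0 ≤ j) (hN : j < (N : Int) + 1) :
    PySem.List.pyGetD ((List.range (N + 1)).map (prefN v)) j 0 = prefS v j := by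
  have hj : j = ((j.toNat : Nat) : Int) := by omega
  rw [hj, PySem.List.pyGetD_natCast]
  have hlt : j.toNat < N + 1 := by omega
  rw [List.getD_eq_getElem?_getD, List.getElem?_map, List.getElem?_range hlt]
  rfl

theorem altInner_spec (v : List Int) (N : Nat) (j best : Int) (h0 : 0 ≤ j)
    (hN : j < (N : Int) + 1) (l : List Int)
    (hl : ∀ i ∈ l, 0 ≤ i ∧ i < (N : Int) + 1) :
    altInner ((List.range (N + 1)).map (prefN v)) j best l =
      match scanFirst v (keyS v j) l with
      | some i => if j - i > best then j - i else best
      | none => best := by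
  induction l with
  | nil => rfl
  | cons a rest ih =>
    obtain ⟨ha0, haN⟩ := hl a (by simp)
    have hcond : (PySem.List.pyGetD ((List.range (N + 1)).map (prefN v)) j 0 -
        PySem.List.pyGetD ((List.range (N + 1)).map (prefN v)) a 0 =
        520 * (j - a)) ↔ keyS v a = keyS v j := by
      rw [getP v N j h0 hN, getP v N a ha0 haN]
      unfold keyS
      constructor <;> intro h <;> omega
    unfold altInner scanFirst
    by_cases h : keyS v a = keyS v j
    · rw [if_pos (hcond.mpr h), if_pos h]
    · rw [if_neg (fun hc => h (hcond.mp hc)), if_neg h,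
        ih (fun i hi => hl i (by simp [hi]))]

theorem foldB_spec (v : List Int) (N : Nat) (t : Nat) (htN : t ≤ N) :
    altOuter ((List.range (N + 1)).map (prefN v)) (PySem.List.pyRange 1 ((t : Int) + 1) 1)
      = bestS v t := by
  induction t with
  | zero => rw [PySem.List.pyRange_one_eq_nil (by omega)]; rfl
  | succ t ih =>
    have hrange := range_succ_split t
    push_cast at hrange ⊢
    unfold altOuter
    rw [hrange, List.foldl_append]
    have ih' := ih (by omega)
    unfold altOuter at ih'
    rw [ih', List.foldl_cons, List.foldl_nil]
    rw [altInner_spec v N ((t : Int) + 1) (bestS v t) (by omega) (by omega)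
      _ (fun i hi => by
        rw [PySem.List.mem_pyRange_one] at hi
        exact ⟨hi.1, by have h2 := hi.2; omega⟩)]
    cases hfind : scanFirst v (keyS v ((t : Int) + 1)) (PySem.List.pyRange 0 ((t : Int) + 1) 1) with
    | some i => simp [bestS, hfind]
    | none => simp [bestS, hfind]

theorem A_eq_bestS (v : List Int) (t : Nat) (ht : (t : Int) ≤ v.length) :
    max_total_value (t : Int) v = 520 * bestS v t := by
  unfold max_total_value
  rw [(foldA_spec v t ht).2.1]

theorem B_eq_bestS (v : List Int) (t : Nat) (ht : (t : Int) ≤ v.length) :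
    max_total_value_alt (t : Int) v = 520 * bestS v t := by
  unfold max_total_value_alt
  rw [foldP_spec v t ht, foldB_spec v t t (le_refl t)]

-- ===== VERDICT (by name: the statement is the Claim_ definition above) =====
theorem max_total_value_spec : Claim_equal_max_total_value := by
  intro n values _ hpre
  unfold Pre_max_total_value at hpre
  unfold Spec_max_total_value
  by_cases hn : 0 ≤ n
  · have h : n = ((n.toNat : Nat) : Int) := by omega
    rw [h, A_eq_bestS values n.toNat (by omega), B_eq_bestS values n.toNat (by omega)]
  · unfold max_total_value max_total_value_alt altOuter
    rw [PySem.List.pyRange_one_eq_nil (by omega)]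
    rfl
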